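-- pv_equiv track=rewrite | github.com/DiegoCoronado3/Seleccion-de-algoritmos-y-resolucion-de-problemas | hexadoku.py | verificar
-- ===== SOURCE A (Python) =====
-- SIMBOLOS = "0123456789ABCDEF"
--
-- def verificar(grid):
--
--     ref = set(SIMBOLOS)
--
--     for r in range(16):
--         if set(grid[r]) != ref:
--             return False
--
--     for c in range(16):
--         if {grid[r][c] for r in range(16)} != ref:
--             return False
--
--     for br in range(4):
--         for bc in range(4):
--
--             s = set()
--
--             for i in range(4):
--                 for j in range(4):
--                     s.add(grid[br*4+i][bc*4+j])
--
--             if s != ref: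
--                 return False
--
--     return True
-- ===== SOURCE B (Python) =====
-- SIMBOLOS = "0123456789ABCDEF"
--
-- def verificar(grid):
--     ref = set(SIMBOLOS)
--     for r in range(16):
--         if set(grid[r]) != ref:
--             return False
--     cols = [set() for _ in range(16)]
--     boxes = [set() for _ in range(16)]
--     for r in range(16):
--         row = grid[r]
--         for c in range(16):
--             x = grid[r][c]
--             b = (r // 4) * 4 + c // 4
--             if x in cols[c] or x in boxes[b]:
--                 return False
--             cols[c].add(x)
--             boxes[b].add(x)
--     return True
-- ===== Notes on version B (the rewrite author's own statement) =====
-- stated objective: alternative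
-- what changed: A's separate column pass and 4x4-box pass are replaced by a single row-major sweep over the 256 cells that maintains 16 column-sets and 16 box-sets and rejects on the first duplicate; only the full-row check (needed for A's whole-row set semantics) is kept as a pass of its own.
import Mathlib
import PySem

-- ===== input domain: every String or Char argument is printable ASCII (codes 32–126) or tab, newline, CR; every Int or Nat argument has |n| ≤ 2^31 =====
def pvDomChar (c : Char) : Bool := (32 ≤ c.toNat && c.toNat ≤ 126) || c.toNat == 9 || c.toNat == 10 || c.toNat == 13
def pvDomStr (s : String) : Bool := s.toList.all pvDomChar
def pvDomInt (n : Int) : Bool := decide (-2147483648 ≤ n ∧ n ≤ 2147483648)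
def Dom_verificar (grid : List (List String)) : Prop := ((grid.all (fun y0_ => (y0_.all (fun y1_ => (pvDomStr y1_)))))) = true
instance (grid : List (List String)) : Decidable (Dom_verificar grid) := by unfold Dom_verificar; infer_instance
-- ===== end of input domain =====

-- B replaces A's separate column pass and box pass by one row-major sweep over the 256 cells
-- maintaining 16 column-sets and 16 box-sets (objective: alternative decomposition, same cost).

-- ===== PORT A =====
-- set(SIMBOLOS): iterating the string yields its 1-character strings
def pvSimbolos : List String := "0123456789ABCDEF".toList.map (fun ch => String.ofList [ch])

def pvRef : PySem.Set String := PySem.Set.ofList pvSimbolos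

def pvR16 : List Int := PySem.List.pyRange 0 16 1

def pvR4 : List Int := PySem.List.pyRange 0 4 1

-- body of A's first loop (textually identical in B): 'if set(grid[r]) != ref: return False'
-- (true = this row makes the pass return False; none from grid[r] = IndexError, outside Pre_)
def pvRowFail (grid : List (List String)) (r : Int) : Bool :=
  match PySem.List.pyGet? grid r with
  | none => true
  | some row => !(PySem.Set.equal (PySem.Set.ofList row) pvRef)

-- grid[r][c] (none = IndexError)
def pvCell (grid : List (List String)) (r c : Int) : Option String :=
  (PySem.List.pyGet? grid r).bind (fun row => PySem.List.pyGet? row c)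

-- '{grid[r][c] for r in range(16)} != ref' (true also on IndexError, outside Pre_)
def pvColFail (grid : List (List String)) (c : Int) : Bool :=
  match pvR16.mapM (fun r => pvCell grid r c) with
  | none => true
  | some l => !(PySem.Set.equal (PySem.Set.ofList l) pvRef)

-- the box loop: s built by adding the 16 cells (i,j order), then 's != ref'
def pvBoxFail (grid : List (List String)) (br bc : Int) : Bool :=
  match (pvR4.flatMap (fun i => pvR4.map (fun j => (i, j)))).mapM
      (fun p => pvCell grid (br * 4 + p.1) (bc * 4 + p.2)) with
  | none => true
  | some l => !(PySem.Set.equal (PySem.Set.ofList l) pvRef)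

def verificar (grid : List (List String)) : Bool :=
  if pvR16.any (fun r => pvRowFail grid r) then false
  else if pvR16.any (fun c => pvColFail grid c) then false
  else if pvR4.any (fun br => pvR4.any (fun bc => pvBoxFail grid br bc)) then false
  else true

-- ===== PORT B =====
-- b = (r // 4) * 4 + c // 4
def pvBoxIdx (r c : Int) : Int := PySem.Int.floordiv r 4 * 4 + PySem.Int.floordiv c 4

-- the cell sweep: for each (r,c) reject if grid[r][c] already in cols[c] or boxes[b], else add it
def pvSweep (grid : List (List String)) :
    List (Int × Int) → List (PySem.Set String) → List (PySem.Set String) → Bool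
  | [], _, _ => true
  | (r, c) :: rest, cols, boxes =>
    match pvCell grid r c with
    | none => false
    | some x =>
      let b := pvBoxIdx r c
      let cs := PySem.List.pyGetD cols c PySem.Set.empty
      let bs := PySem.List.pyGetD boxes b PySem.Set.empty
      if PySem.Set.contains cs x || PySem.Set.contains bs x then false
      else pvSweep grid rest (PySem.List.pySetD cols c (PySem.Set.add cs x))
                             (PySem.List.pySetD boxes b (PySem.Set.add bs x))

-- the (r, c) pairs of Source B's nested loops, row-major
def pvAllPairs : List (Int × Int) := pvR16.flatMap (fun r => pvR16.map (fun c => (r, c)))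

def verificar_alt (grid : List (List String)) : Bool :=
  if pvR16.any (fun r => pvRowFail grid r) then false
  else pvSweep grid pvAllPairs (List.replicate 16 PySem.Set.empty) (List.replicate 16 PySem.Set.empty)

-- ===== PRECONDITION & SPEC =====
-- A raises IndexError exactly when the grid has fewer than 16 rows and every row it does have
-- equals the reference set (the first loop then runs off the end); Pre_ excludes exactly that.
def Pre_verificar (grid : List (List String)) : Prop :=
  16 ≤ grid.length ∨ ∃ row ∈ grid, PySem.Set.equal (PySem.Set.ofList row) pvRef = false

instance (grid : List (List String)) : Decidable (Pre_verificar grid) := by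
  unfold Pre_verificar; infer_instance

def pvWitness_verificar : List (List String) := List.replicate 16 []

def Spec_verificar (grid : List (List String)) (out : Bool) : Prop := out = verificar_alt grid
instance (grid : List (List String)) (out : Bool) : Decidable (Spec_verificar grid out) := by
  unfold Spec_verificar; infer_instance

-- ===== CLAIM (what is proved, stated in full; the proofs are below) =====
def Claim_equal_verificar : Prop :=
  ∀ (grid : List (List String)), Dom_verificar grid → Pre_verificar grid →
    Spec_verificar grid (verificar grid)

-- ===== LEMMAS AND PROOFS =====

-- total cell read (proof-side only)
def pvCellD (grid : List (List String)) (r c : Int) : String := (pvCell grid r c).getD ""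

-- "l is duplicate-free and disjoint from the seen-set s"
def pvNF (s : PySem.Set String) (l : List String) : Prop := l.Nodup ∧ ∀ x ∈ l, x ∉ s

def pvColCells (grid : List (List String)) (ps : List (Int × Int)) (k : Int) : List String :=
  (ps.filter (fun p => p.2 == k)).map (fun p => pvCellD grid p.1 p.2)

def pvBoxCells (grid : List (List String)) (ps : List (Int × Int)) (k : Int) : List String :=
  (ps.filter (fun p => pvBoxIdx p.1 p.2 == k)).map (fun p => pvCellD grid p.1 p.2)

def pvColListD (grid : List (List String)) (c : Int) : List String :=
  pvR16.map (fun r => (pvCell grid r c).getD "")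

def pvBoxListD (grid : List (List String)) (br bc : Int) : List String :=
  (pvR4.flatMap (fun i => pvR4.map (fun j => (i, j)))).map
    (fun p => (pvCell grid (br * 4 + p.1) (bc * 4 + p.2)).getD "")

lemma pv_mapM_eq {α : Type} (f : α → Option String) :
    ∀ l : List α, (∀ a ∈ l, (f a).isSome) → l.mapM f = some (l.map (fun a => (f a).getD "")) := by
  intro l
  induction l with
  | nil => intro _; rfl
  | cons a l ih =>
    intro h
    obtain ⟨x, hx⟩ := Option.isSome_iff_exists.mp (h a (by simp))
    have hl := ih (fun b hb => h b (by simp [hb]))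
    simp [List.mapM_cons, hx, hl]

lemma pvEqRef_iff (l : List String) (hsub : ∀ x ∈ l, x ∈ pvSimbolos) (hlen : l.length = 16) :
    PySem.Set.equal (PySem.Set.ofList l) pvRef = true ↔ l.Nodup := by
  have hndS : pvSimbolos.Nodup := by decide
  have hlenS : pvSimbolos.length = 16 := by decide
  constructor
  · intro h
    have hm : ∀ x, x ∈ l ↔ x ∈ pvSimbolos := by
      intro x
      have := (PySem.Set.equal_iff _ _).mp h x
      simpa [PySem.Set.mem_ofList, pvRef] using this
    have hperm : pvSimbolos.Perm l :=
      (hndS.subperm (fun x hx => (hm x).mpr hx)).perm_of_length_le (by omega)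
    exact hperm.nodup hndS
  · intro hnd
    have hperm : l.Perm pvSimbolos := (hnd.subperm hsub).perm_of_length_le (by omega)
    apply (PySem.Set.equal_iff _ _).mpr
    intro x
    simp [PySem.Set.mem_ofList, pvRef, hperm.mem_iff]

lemma pvRows_cell (grid : List (List String))
    (hrows : pvR16.any (fun r => pvRowFail grid r) = false) :
    ∀ n m : Nat, n < 16 → m < 16 →
      ∃ x, pvCell grid (n : Int) (m : Int) = some x ∧ x ∈ pvSimbolos := by
  intro n m hn hm
  have hmem : (n : Int) ∈ pvR16 := by
    have : ∀ k : Nat, k < 16 → ((k : Int) ∈ pvR16) := by decide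
    exact this n hn
  have hf : pvRowFail grid (n : Int) = false := by
    simpa using List.any_eq_false.mp hrows _ hmem
  unfold pvRowFail at hf
  cases hget : PySem.List.pyGet? grid (n : Int) with
  | none => rw [hget] at hf; simp at hf
  | some row =>
    rw [hget] at hf
    simp only [Bool.not_eq_false'] at hf
    have hm2 : ∀ x, x ∈ row ↔ x ∈ pvSimbolos := by
      intro x
      have := (PySem.Set.equal_iff _ _).mp hf x
      simpa [PySem.Set.mem_ofList, pvRef] using this
    have hndS : pvSimbolos.Nodup := by decide
    have hsp : pvSimbolos.Subperm row := hndS.subperm (fun x hx => (hm2 x).mpr hx)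
    have hlen : 16 ≤ row.length := by simpa using hsp.length_le
    have hgetc : PySem.List.pyGet? row (m : Int) = some row[m] :=
      PySem.List.pyGet?_ofNat row m (by omega)
    exact ⟨row[m], by simp [pvCell, hget], (hm2 _).mp (List.getElem_mem _)⟩

lemma pvNF_cons (s : PySem.Set String) (x : String) (l : List String) :
    pvNF s (x :: l) ↔ x ∉ s ∧ x ∉ l ∧ pvNF s l := by
  simp only [pvNF, List.nodup_cons, List.mem_cons]
  constructor
  · rintro ⟨⟨h1, h2⟩, h3⟩
    exact ⟨h3 x (Or.inl rfl), h1, h2, fun y hy => h3 y (Or.inr hy)⟩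
  · rintro ⟨h1, h2, h3, h4⟩
    exact ⟨⟨h2, h3⟩, by rintro y (rfl | hy); exact h1; exact h4 y hy⟩

lemma pvNF_add_cons (s : PySem.Set String) (x : String) (l : List String) (hx : x ∉ s) :
    pvNF (PySem.Set.add s x) l ↔ pvNF s (x :: l) := by
  rw [pvNF_cons]
  simp only [pvNF, PySem.Set.mem_add]
  constructor
  · rintro ⟨h1, h2⟩
    exact ⟨hx, fun hxl => (h2 x hxl) (Or.inr rfl), h1, fun y hy hys => (h2 y hy) (Or.inl hys)⟩
  · rintro ⟨_, h2, h3, h4⟩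
    refine ⟨h3, fun y hy => ?_⟩
    rintro (hys | rfl)
    · exact h4 y hy hys
    · exact h2 hy

lemma pvSweep_iff (grid : List (List String)) :
    ∀ (ps : List (Int × Int)) (cols boxes : List (PySem.Set String)),
      cols.length = 16 → boxes.length = 16 →
      (∀ p ∈ ps, (∃ n : Nat, n < 16 ∧ p.1 = (n : Int)) ∧ (∃ m : Nat, m < 16 ∧ p.2 = (m : Int)) ∧
        (pvCell grid p.1 p.2).isSome) →
      (pvSweep grid ps cols boxes = true ↔ ∀ k : Nat, k < 16 →
        pvNF (PySem.List.pyGetD cols (k : Int) PySem.Set.empty) (pvColCells grid ps (k : Int)) ∧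
        pvNF (PySem.List.pyGetD boxes (k : Int) PySem.Set.empty) (pvBoxCells grid ps (k : Int))) := by
  intro ps
  induction ps with
  | nil =>
    intro cols boxes _ _ _
    simp [pvSweep, pvColCells, pvBoxCells, pvNF]
  | cons p rest ih =>
    obtain ⟨r, c⟩ := p
    intro cols boxes hcl hbl hp
    obtain ⟨⟨n, hn, hr⟩, ⟨m, hm, hc⟩, hs⟩ := hp (r, c) (by simp)
    simp only at hr hc
    subst hr; subst hc
    obtain ⟨x, hx⟩ := Option.isSome_iff_exists.mp hs
    have hb : pvBoxIdx (n : Int) (m : Int) = ((n / 4 * 4 + m / 4 : Nat) : Int) := by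
      simp [pvBoxIdx]
    have hbi : n / 4 * 4 + m / 4 < 16 := by omega
    set bI : Nat := n / 4 * 4 + m / 4 with hbIdef
    have hcd : pvCellD grid (n : Int) (m : Int) = x := by simp [pvCellD, hx]
    set cs := PySem.List.pyGetD cols (m : Int) PySem.Set.empty with hcs
    set bs := PySem.List.pyGetD boxes (bI : Int) PySem.Set.empty with hbs
    have hstep : pvSweep grid ((((n : Int)), ((m : Int))) :: rest) cols boxes =
        (if PySem.Set.contains cs x || PySem.Set.contains bs x then false
         else pvSweep grid rest (PySem.List.pySetD cols (m : Int) (PySem.Set.add cs x))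
                                (PySem.List.pySetD boxes ((bI : Nat) : Int) (PySem.Set.add bs x))) := by
      simp only [pvSweep, hx, hb]
      rfl
    have hccEq : pvColCells grid ((((n : Int)), ((m : Int))) :: rest) (m : Int) =
        x :: pvColCells grid rest (m : Int) := by
      simp [pvColCells, hcd]
    have hccNe : ∀ k : Nat, k ≠ m →
        pvColCells grid ((((n : Int)), ((m : Int))) :: rest) (k : Int) =
          pvColCells grid rest (k : Int) := by
      intro k hk
      simp [pvColCells, Ne.symm hk]
    have hbcEq : pvBoxCells grid ((((n : Int)), ((m : Int))) :: rest) (bI : Int) =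
        x :: pvBoxCells grid rest (bI : Int) := by
      simp [pvBoxCells, hb, hcd]
    have hbcNe : ∀ k : Nat, k ≠ bI →
        pvBoxCells grid ((((n : Int)), ((m : Int))) :: rest) (k : Int) =
          pvBoxCells grid rest (k : Int) := by
      intro k hk
      simp [pvBoxCells, hb, Ne.symm hk]
    by_cases hdup : PySem.Set.contains cs x || PySem.Set.contains bs x
    · rw [hstep, if_pos hdup]
      constructor
      · intro h; exact absurd h (by simp)
      · intro h
        exfalso
        rcases Bool.or_eq_true_iff.mp hdup with hin | hin
        · have hxin : x ∈ cs := by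
            simpa [PySem.Set.contains_eq_listContains] using hin
          exact (h m hm).1.2 x (by rw [hccEq]; exact List.mem_cons_self) hxin
        · have hxin : x ∈ bs := by
            simpa [PySem.Set.contains_eq_listContains] using hin
          exact (h bI hbi).2.2 x (by rw [hbcEq]; exact List.mem_cons_self) hxin
    · rw [hstep, if_neg hdup]
      have hxcs : x ∉ cs := fun hxin =>
        hdup (Bool.or_eq_true_iff.mpr (Or.inl (by
          simpa [PySem.Set.contains_eq_listContains] using hxin)))
      have hxbs : x ∉ bs := fun hxin =>
        hdup (Bool.or_eq_true_iff.mpr (Or.inr (by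
          simpa [PySem.Set.contains_eq_listContains] using hxin)))
      rw [ih _ _ (by simp [hcl]) (by simp [hbl]) (fun q hq => hp q (by simp [hq]))]
      have hGc : ∀ (k : Nat) (v : PySem.Set String),
          PySem.List.pyGetD (PySem.List.pySetD cols (m : Int) v) (k : Int) PySem.Set.empty =
            if k = m then v else PySem.List.pyGetD cols (k : Int) PySem.Set.empty :=
        fun k v => PySem.List.pyGetD_pySetD_natCast cols m k v _ (by omega)
      have hGb : ∀ (k : Nat) (v : PySem.Set String),
          PySem.List.pyGetD (PySem.List.pySetD boxes (bI : Int) v) (k : Int) PySem.Set.empty =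
            if k = bI then v else PySem.List.pyGetD boxes (k : Int) PySem.Set.empty :=
        fun k v => PySem.List.pyGetD_pySetD_natCast boxes bI k v _ (by omega)
      refine forall_congr' fun k => imp_congr_right fun hk => and_congr ?_ ?_
      · rw [hGc]
        by_cases hkm : k = m
        · subst hkm
          rw [if_pos rfl, hccEq, pvNF_add_cons _ _ _ hxcs]
        · rw [if_neg hkm, hccNe k hkm]
      · rw [hGb]
        by_cases hkb : k = bI
        · subst hkb
          rw [if_pos rfl, hbcEq, pvNF_add_cons _ _ _ hxbs]
        · rw [if_neg hkb, hbcNe k hkb]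

lemma pvColFail_iff (grid : List (List String))
    (hrows : pvR16.any (fun r => pvRowFail grid r) = false)
    (k : Nat) (hk : k < 16) :
    pvColFail grid (k : Int) = false ↔ (pvColListD grid (k : Int)).Nodup := by
  have hcell := pvRows_cell grid hrows
  have hconv : ∀ r ∈ pvR16, ∃ n : Nat, n < 16 ∧ r = (n : Int) := by decide
  have hsome : ∀ r ∈ pvR16, (pvCell grid r (k : Int)).isSome := by
    intro r hr
    obtain ⟨n, hn, rfl⟩ := hconv r hr
    obtain ⟨x, hx, _⟩ := hcell n k hn hk
    simp [hx]
  have hmapM := pv_mapM_eq (fun r => pvCell grid r (k : Int)) pvR16 hsome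
  have hsub : ∀ x ∈ pvColListD grid (k : Int), x ∈ pvSimbolos := by
    intro x hxm
    obtain ⟨r, hr, hx⟩ := List.mem_map.mp hxm
    obtain ⟨n, hn, rfl⟩ := hconv r hr
    obtain ⟨y, hy, hys⟩ := hcell n k hn hk
    rw [← hx]; simpa [hy] using hys
  have hlen : (pvColListD grid (k : Int)).length = 16 := by
    simp [pvColListD]; decide
  unfold pvColFail
  rw [hmapM]
  rw [← pvEqRef_iff _ hsub hlen]
  simp [pvColListD]

lemma pvBoxFail_iff (grid : List (List String))
    (hrows : pvR16.any (fun r => pvRowFail grid r) = false)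
    (a b : Nat) (ha : a < 4) (hb : b < 4) :
    pvBoxFail grid (a : Int) (b : Int) = false ↔ (pvBoxListD grid (a : Int) (b : Int)).Nodup := by
  have hcell := pvRows_cell grid hrows
  have hconv : ∀ p ∈ (pvR4.flatMap (fun i => pvR4.map (fun j => (i, j)))),
      ∃ i : Nat, i < 4 ∧ ∃ j : Nat, j < 4 ∧ p = ((i : Int), (j : Int)) := by decide
  have hval : ∀ p ∈ (pvR4.flatMap (fun i => pvR4.map (fun j => (i, j)))),
      ∃ y, pvCell grid ((a : Int) * 4 + p.1) ((b : Int) * 4 + p.2) = some y ∧ y ∈ pvSimbolos := by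
    intro p hp
    obtain ⟨i, hi, j, hj, rfl⟩ := hconv p hp
    have h1 : ((a : Int) * 4 + (i : Int)) = ((a * 4 + i : Nat) : Int) := by push_cast; ring
    have h2 : ((b : Int) * 4 + (j : Int)) = ((b * 4 + j : Nat) : Int) := by push_cast; ring
    rw [h1, h2]
    exact hcell _ _ (by omega) (by omega)
  have hsome : ∀ p ∈ (pvR4.flatMap (fun i => pvR4.map (fun j => (i, j)))),
      (pvCell grid ((a : Int) * 4 + p.1) ((b : Int) * 4 + p.2)).isSome := by
    intro p hp
    obtain ⟨y, hy, _⟩ := hval p hp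
    simp [hy]
  have hmapM := pv_mapM_eq (fun p : Int × Int => pvCell grid ((a : Int) * 4 + p.1) ((b : Int) * 4 + p.2))
    (pvR4.flatMap (fun i => pvR4.map (fun j => (i, j)))) hsome
  have hsub : ∀ x ∈ pvBoxListD grid (a : Int) (b : Int), x ∈ pvSimbolos := by
    intro x hxm
    obtain ⟨p, hp, hx⟩ := List.mem_map.mp hxm
    obtain ⟨y, hy, hys⟩ := hval p hp
    rw [← hx]; simpa [hy] using hys
  have hlen : (pvBoxListD grid (a : Int) (b : Int)).length = 16 := by
    simp [pvBoxListD]; decide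
  unfold pvBoxFail
  rw [hmapM]
  rw [← pvEqRef_iff _ hsub hlen]
  simp [pvBoxListD]

lemma pvColGlue (grid : List (List String)) :
    ∀ k : Nat, k < 16 → pvColCells grid pvAllPairs (k : Int) = pvColListD grid (k : Int) := by
  intro k hk; interval_cases k <;> rfl

lemma pvBoxGlue (grid : List (List String)) :
    ∀ k : Nat, k < 16 → pvBoxCells grid pvAllPairs (k : Int) =
      pvBoxListD grid ((k / 4 : Nat) : Int) ((k % 4 : Nat) : Int) := by
  intro k hk; interval_cases k <;> rfl

lemma pvNF_empty (l : List String) : pvNF PySem.Set.empty l ↔ l.Nodup := by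
  simp [pvNF, PySem.Set.empty]

lemma pvRepl_getD (k : Nat) :
    PySem.List.pyGetD (List.replicate 16 (PySem.Set.empty : PySem.Set String)) (k : Int)
      PySem.Set.empty = PySem.Set.empty := by
  rw [PySem.List.pyGetD_natCast]
  unfold List.getD
  rw [List.getElem?_replicate]
  split <;> rfl

-- ===== VERDICT (by name: the statement is the Claim_ definition above) =====
set_option maxRecDepth 8192 in
theorem verificar_spec : Claim_equal_verificar := by
  unfold Claim_equal_verificar
  intro grid _ _
  unfold Spec_verificar
  cases hrows : pvR16.any (fun r => pvRowFail grid r) with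
  | true => simp [verificar, verificar_alt, hrows]
  | false =>
    have hcell := pvRows_cell grid hrows
    have hpairs : ∀ p ∈ pvAllPairs, (∃ n : Nat, n < 16 ∧ p.1 = (n : Int)) ∧
        (∃ m : Nat, m < 16 ∧ p.2 = (m : Int)) ∧ (pvCell grid p.1 p.2).isSome := by
      intro p hp
      have hnm : ∃ n : Nat, n < 16 ∧ ∃ m : Nat, m < 16 ∧ p = ((n : Int), (m : Int)) := by
        revert hp; revert p; decide
      obtain ⟨n, hn, m, hm, rfl⟩ := hnm
      refine ⟨⟨n, hn, rfl⟩, ⟨m, hm, rfl⟩, ?_⟩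
      obtain ⟨x, hx, _⟩ := hcell n m hn hm
      simp [hx]
    have hsw := pvSweep_iff grid pvAllPairs (List.replicate 16 PySem.Set.empty)
      (List.replicate 16 PySem.Set.empty) (by simp) (by simp) hpairs
    have hswiff : pvSweep grid pvAllPairs (List.replicate 16 PySem.Set.empty)
        (List.replicate 16 PySem.Set.empty) = true ↔
        ((∀ k : Nat, k < 16 → (pvColListD grid (k : Int)).Nodup) ∧
         (∀ k : Nat, k < 16 →
            (pvBoxListD grid ((k / 4 : Nat) : Int) ((k % 4 : Nat) : Int)).Nodup)) := by
      rw [hsw]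
      constructor
      · intro h
        refine ⟨fun k hk => ?_, fun k hk => ?_⟩
        · have h1 := (h k hk).1
          rw [pvRepl_getD k, pvColGlue grid k hk] at h1
          exact (pvNF_empty _).mp h1
        · have h2 := (h k hk).2
          rw [pvRepl_getD k, pvBoxGlue grid k hk] at h2
          exact (pvNF_empty _).mp h2
      · rintro ⟨h1, h2⟩ k hk
        constructor
        · rw [pvRepl_getD k, pvColGlue grid k hk]
          exact (pvNF_empty _).mpr (h1 k hk)
        · rw [pvRepl_getD k, pvBoxGlue grid k hk]
          exact (pvNF_empty _).mpr (h2 k hk)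
    have hmemR16 : ∀ k : Nat, k < 16 → ((k : Int) ∈ pvR16) := by decide
    have hconvR16 : ∀ c ∈ pvR16, ∃ k : Nat, k < 16 ∧ c = (k : Int) := by decide
    have hmemR4 : ∀ k : Nat, k < 4 → ((k : Int) ∈ pvR4) := by decide
    have hconvR4 : ∀ c ∈ pvR4, ∃ k : Nat, k < 4 ∧ c = (k : Int) := by decide
    have hcolsIff : (pvR16.any fun c => pvColFail grid c) = false ↔
        ∀ k : Nat, k < 16 → (pvColListD grid (k : Int)).Nodup := by
      rw [List.any_eq_false]
      constructor
      · intro h k hk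
        exact (pvColFail_iff grid hrows k hk).mp (by simpa using h _ (hmemR16 k hk))
      · intro h c hc
        obtain ⟨k, hk, rfl⟩ := hconvR16 c hc
        simp [(pvColFail_iff grid hrows k hk).mpr (h k hk)]
    have hboxIff : (pvR4.any fun br => pvR4.any fun bc => pvBoxFail grid br bc) = false ↔
        ∀ k : Nat, k < 16 →
          (pvBoxListD grid ((k / 4 : Nat) : Int) ((k % 4 : Nat) : Int)).Nodup := by
      rw [List.any_eq_false]
      constructor
      · intro h k hk
        have hinner := List.any_eq_false.mp (by simpa using h _ (hmemR4 (k / 4) (by omega)))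
        exact (pvBoxFail_iff grid hrows (k / 4) (k % 4) (by omega) (by omega)).mp
          (by simpa using hinner _ (hmemR4 (k % 4) (by omega)))
      · intro h br hbr
        obtain ⟨a, ha, rfl⟩ := hconvR4 br hbr
        simp only [Bool.not_eq_true, List.any_eq_false]
        intro bc hbc
        obtain ⟨b, hb, rfl⟩ := hconvR4 bc hbc
        have hk : a * 4 + b < 16 := by omega
        have hnd := h (a * 4 + b) hk
        have e1 : (a * 4 + b) / 4 = a := by omega
        have e2 : (a * 4 + b) % 4 = b := by omega
        rw [e1, e2] at hnd
        simp [(pvBoxFail_iff grid hrows a b ha hb).mpr hnd]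
    simp only [verificar, verificar_alt, hrows, Bool.false_eq_true, if_false]
    cases hA : (pvR16.any fun c => pvColFail grid c) with
    | true =>
      simp only [if_true]
      cases hS : pvSweep grid pvAllPairs (List.replicate 16 PySem.Set.empty)
          (List.replicate 16 PySem.Set.empty) with
      | false => rfl
      | true =>
        exfalso
        have := hcolsIff.mpr (hswiff.mp hS).1
        rw [hA] at this; exact Bool.true_eq_false.mp this
    | false =>
      simp only [Bool.false_eq_true, if_false]
      cases hB : (pvR4.any fun br => pvR4.any fun bc => pvBoxFail grid br bc) with
      | true =>
        simp only [if_true]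
        cases hS : pvSweep grid pvAllPairs (List.replicate 16 PySem.Set.empty)
            (List.replicate 16 PySem.Set.empty) with
        | false => rfl
        | true =>
          exfalso
          have := hboxIff.mpr (hswiff.mp hS).2
          rw [hB] at this; exact Bool.true_eq_false.mp this
      | false =>
        simp only [Bool.false_eq_true, if_false]
        exact (hswiff.mpr ⟨hcolsIff.mp hA, hboxIff.mp hB⟩).symm
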